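-- pv_equiv track=rewrite | github.com/Seki-Rin/p2p-networking | src/net.py | _validate_mask_bin
-- ===== SOURCE A (Python) =====
-- def _validate_mask_bin(mask_bin:str) -> bool:
--     is_zero = False
--     for i in mask_bin:
--         if is_zero:
--             if i == '1':
--                 return False
--         elif i == '0':
--             is_zero = True
--     return True
-- ===== SOURCE B (Python) =====
-- def _validate_mask_bin(mask_bin: str) -> bool:
--     bits = [c for c in mask_bin if c == '0' or c == '1']
--     return bits == sorted(bits, reverse=True)
-- ===== Notes on version B (the rewrite author's own statement) =====
-- stated objective: alternative
-- what changed: Instead of A's stateful flag-driven scan, B filters out the '0'/'1' characters and checks that this bit list equals its own descending sort (all ones before all zeros).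
import Mathlib
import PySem

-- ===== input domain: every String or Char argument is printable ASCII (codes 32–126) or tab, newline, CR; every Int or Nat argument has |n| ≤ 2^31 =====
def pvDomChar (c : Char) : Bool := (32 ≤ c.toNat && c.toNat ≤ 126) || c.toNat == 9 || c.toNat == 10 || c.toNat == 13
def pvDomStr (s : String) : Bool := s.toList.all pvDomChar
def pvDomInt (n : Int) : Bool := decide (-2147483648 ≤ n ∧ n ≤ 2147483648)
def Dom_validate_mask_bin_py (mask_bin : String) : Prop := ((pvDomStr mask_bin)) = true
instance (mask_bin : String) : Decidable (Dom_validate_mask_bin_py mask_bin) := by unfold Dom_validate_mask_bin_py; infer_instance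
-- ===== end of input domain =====

-- B replaces A's flag-driven scan by filtering the '0'/'1' characters and comparing the bit list with its descending sort (alternative decomposition, not faster).

-- ===== PORT A =====
-- the for-loop with the mutable flag `is_zero` and the early `return False`
def pvALoop : List Char → Bool → Bool
  | [], _ => true
  | c :: cs, true => if c = '1' then false else pvALoop cs true
  | c :: cs, false => if c = '0' then pvALoop cs true else pvALoop cs false

def validate_mask_bin_py (mask_bin : String) : Bool :=
  pvALoop mask_bin.toList false

-- ===== PORT B =====
def validate_mask_bin_py_alt (mask_bin : String) : Bool :=
  -- bits = [c for c in mask_bin if c == '0' or c == '1']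
  let bits := mask_bin.toList.filter (fun c => c = '0' || c = '1')
  -- bits == sorted(bits, reverse=True)
  decide (bits = PySem.List.sorted bits (fun c => c) true)

-- ===== PRECONDITION & SPEC =====
def Spec_validate_mask_bin_py (mask_bin : String) (out : Bool) : Prop := out = validate_mask_bin_py_alt mask_bin
instance (mask_bin : String) (out : Bool) : Decidable (Spec_validate_mask_bin_py mask_bin out) := by unfold Spec_validate_mask_bin_py; infer_instance

-- ===== CLAIM (what is proved, stated in full; the proofs are below) =====
def Claim_equal_validate_mask_bin_py : Prop := ∀ (mask_bin : String), Dom_validate_mask_bin_py mask_bin → Spec_validate_mask_bin_py mask_bin (validate_mask_bin_py mask_bin)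

-- ===== LEMMAS AND PROOFS =====

-- A's loop ignores characters other than '0' and '1' in either phase
lemma pvALoop_filter (cs : List Char) (b : Bool) :
    pvALoop cs b = pvALoop (cs.filter (fun c => c = '0' || c = '1')) b := by
  induction cs generalizing b with
  | nil => rfl
  | cons c t ih =>
    by_cases h0 : c = '0'
    · cases b <;> simp [pvALoop, h0, ih]
    · by_cases h1 : c = '1'
      · cases b <;> simp [pvALoop, h1, ih]
      · cases b <;> simp [pvALoop, h0, h1, ih]

-- the is_zero = true phase of A's loop returns false exactly when a later '1' exists
lemma pvALoop_true (cs : List Char) : pvALoop cs true = !(decide ('1' ∈ cs)) := by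
  induction cs with
  | nil => simp [pvALoop]
  | cons c t ih =>
    by_cases h : c = '1'
    · simp [pvALoop, h]
    · simp [pvALoop, h, ih]
      exact fun _ h1 => h h1.symm

-- on a list of bit characters, A's loop accepts exactly the non-increasing lists
lemma pvALoop_pairwise (bits : List Char) (hb : ∀ c ∈ bits, c = '0' ∨ c = '1') :
    pvALoop bits false = decide (bits.Pairwise (fun a b => b ≤ a)) := by
  induction bits with
  | nil => simp [pvALoop]
  | cons c t ih =>
    have hbt : ∀ c ∈ t, c = '0' ∨ c = '1' := fun x hx => hb x (List.mem_cons_of_mem _ hx)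
    rcases hb c List.mem_cons_self with hc | hc
    · subst hc
      show (if ('0':Char) = '0' then pvALoop t true else pvALoop t false) = _
      rw [if_pos rfl, pvALoop_true]
      by_cases h1 : '1' ∈ t
      · have : ¬ ('0'::t).Pairwise (fun a b => b ≤ a) := by
          intro hp
          have := (List.pairwise_cons.1 hp).1 '1' h1
          exact absurd this (by decide)
        simp [h1, this]
      · have hall : ∀ x ∈ t, x = '0' := fun x hx =>
          (hbt x hx).resolve_right (fun h => h1 (h ▸ hx))
        have hp : ('0'::t).Pairwise (fun a b => b ≤ a) := by
          rw [List.pairwise_cons]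
          refine ⟨fun x hx => by rw [hall x hx], ?_⟩
          refine List.Pairwise.imp_of_mem ?_ (List.pairwise_of_forall_mem_list (fun a ha b hb => True.intro))
          intro a b ha hb _
          rw [hall a ha, hall b hb]
        simp [h1, hp]
    · subst hc
      show (if ('1':Char) = '0' then pvALoop t true else pvALoop t false) = _
      rw [if_neg (by decide), ih hbt]
      have hle : ∀ x ∈ t, x ≤ '1' := fun x hx => by
        rcases hbt x hx with h | h <;> subst h <;> decide
      by_cases hp : t.Pairwise (fun a b => b ≤ a)
      · have : ('1'::t).Pairwise (fun a b => b ≤ a) :=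
          List.pairwise_cons.2 ⟨hle, hp⟩
        simp [hp, this]
      · have : ¬ ('1'::t).Pairwise (fun a b => b ≤ a) := fun h =>
          hp (List.pairwise_cons.1 h).2
        simp [hp, this]

-- equality with the descending sort is exactly the non-increasing Pairwise condition
lemma pv_sorted_rev_iff (bits : List Char) :
    (bits = PySem.List.sorted bits (fun c => c) true) ↔ bits.Pairwise (fun a b => b ≤ a) := by
  constructor
  · intro h
    have := PySem.List.sorted_pairwise_rev (xs := bits) (key := fun c => c)
    rw [← h] at this
    exact this
  · intro h
    exact (PySem.List.sorted_rev_eq_self_of_pairwise (xs := bits) (key := fun c => c) h).symm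

-- ===== VERDICT (by name: the statement is the Claim_ definition above) =====
theorem validate_mask_bin_py_spec : Claim_equal_validate_mask_bin_py := by
  intro s _
  unfold Spec_validate_mask_bin_py validate_mask_bin_py validate_mask_bin_py_alt
  rw [pvALoop_filter]
  set bits := s.toList.filter (fun c => c = '0' || c = '1') with hbits
  have hb : ∀ c ∈ bits, c = '0' ∨ c = '1' := by
    intro c hc
    have := List.of_mem_filter hc
    rcases Bool.or_eq_true_iff.1 this with h | h
    · exact Or.inl (by simpa using h)
    · exact Or.inr (by simpa using h)
  rw [pvALoop_pairwise bits hb]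
  simp [pv_sorted_rev_iff]
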